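-- pv_equiv track=rewrite | github.com/minghu6/leet-code | 1340_jump_games_5/py1340/greedy_tp_dp.py | solve
-- ===== SOURCE A (Python) =====
-- from typing import List
--
-- max_int = 100_000 + 1
--
-- def solve(arr: List[int], d: int) -> int:
--     arr.append(max_int)
--
--     n = len(arr)
--
--     stack = []
--     dp = [1] * n
--
--     for i in range(n):
--         while stack and arr[stack[-1]] < arr[i]:
--             isoheight = [stack.pop()]
--
--             while stack and arr[stack[-1]] == arr[isoheight[0]]:
--                 isoheight.append(stack.pop())
--
--             for j in isoheight:
--                 if i-j <= d:
--                     dp[i] = max(dp[i], dp[j]+1)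
--
--                 if stack and j-stack[-1] <= d:
--                     dp[stack[-1]] = max(dp[stack[-1]], dp[j]+1)
--
--         stack.append(i)
--
--     return max(dp[:-1])
-- ===== SOURCE B (Python) =====
-- from typing import List
--
-- max_int = 100_000 + 1
--
-- def solve(arr: List[int], d: int) -> int:
--     arr.append(max_int)
--     m = len(arr)
--     n = m - 1
--
--     def nge(j):  # nearest strictly greater to the right (sentinel included)
--         for t in range(j + 1, m):
--             if arr[t] > arr[j]:
--                 return t
--         return None
--
--     def pge(j):  # nearest strictly greater to the left
--         for t in range(j - 1, -1, -1):
--             if arr[t] > arr[j]: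
--                 return t
--         return None
--
--     dp = [1] * m
--     for j in sorted(range(n), key=lambda j: arr[j]):
--         t = nge(j)
--         if t is not None:
--             if t - j <= d:
--                 dp[t] = max(dp[t], dp[j] + 1)
--             p = pge(j)
--             if p is not None and j - p <= d:
--                 dp[p] = max(dp[p], dp[j] + 1)
--     return max(dp[:n])
-- ===== Notes on version B (the rewrite author's own statement) =====
-- stated objective: alternative
-- what changed: Replaces the single-pass monotonic-stack DP with a two-phase algorithm: each index's nearest strictly-greater neighbour on each side is found by a direct scan, then dp is accumulated by processing indices in ascending height order over a value-sorted index list.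
import Mathlib
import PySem

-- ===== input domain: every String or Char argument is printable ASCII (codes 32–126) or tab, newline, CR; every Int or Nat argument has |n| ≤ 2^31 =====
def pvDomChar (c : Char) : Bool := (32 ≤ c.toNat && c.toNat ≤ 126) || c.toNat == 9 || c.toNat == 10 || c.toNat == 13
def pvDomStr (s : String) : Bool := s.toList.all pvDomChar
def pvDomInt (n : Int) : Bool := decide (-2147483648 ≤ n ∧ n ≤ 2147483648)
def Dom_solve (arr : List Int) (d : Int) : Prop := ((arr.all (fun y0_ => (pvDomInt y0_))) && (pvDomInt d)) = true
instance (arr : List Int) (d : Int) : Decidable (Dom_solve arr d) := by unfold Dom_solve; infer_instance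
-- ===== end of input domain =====

-- B replaces A's one-pass monotonic-stack DP by a two-phase algorithm: nearest strictly-greater
-- neighbours found by direct scans, then dp accumulated over indices sorted by height (alternative
-- algorithm, not faster).  Note: the Python A (and B) append a sentinel to `arr` in place; the
-- equivalence proved here is about the RETURN value only.

-- ===== PORT A =====
-- Python max(xs) over a nonempty list (0 on [], excluded by Pre_)
def pvMaxList (xs : List Int) : Int :=
  match xs with
  | [] => 0
  | x :: t => t.foldl max x

-- body of `for j in isoheight: ...` (one j); `rest` is the stack below the popped group
def pvUpdJ (a : List Int) (d : Int) (i : Nat) (rest : List Nat) (dp : List Int) (j : Nat) : List Int :=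
  let dp1 := if (i : Int) - (j : Int) ≤ d then dp.set i (max (dp.getD i 0) (dp.getD j 0 + 1)) else dp
  match rest with
  | [] => dp1
  | p :: _ => if (j : Int) - (p : Int) ≤ d then dp1.set p (max (dp1.getD p 0) (dp1.getD j 0 + 1)) else dp1

-- the outer `while stack and arr[stack[-1]] < arr[i]` loop; stack top = list head
def pvPopLoop (a : List Int) (d : Int) (i : Nat) (stack : List Nat) (dp : List Int) : List Nat × List Int :=
  match stack with
  | [] => ([], dp)
  | j0 :: st =>
    if a.getD j0 0 < a.getD i 0 then
      -- isoheight = popped maximal group of equal height (inner while = takeWhile)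
      let iso := j0 :: st.takeWhile (fun j => a.getD j 0 == a.getD j0 0)
      let rest := st.dropWhile (fun j => a.getD j 0 == a.getD j0 0)
      pvPopLoop a d i rest (iso.foldl (pvUpdJ a d i rest) dp)
    else (j0 :: st, dp)
termination_by stack.length
decreasing_by
  have h := List.length_dropWhile_le (fun j => a.getD j 0 == a.getD j0 0) st
  simp only [List.length_cons]
  omega

def solve (arr : List Int) (d : Int) : Int :=
  let a := arr ++ [100001]
  let n := a.length
  let res := (List.range n).foldl
    (fun (s : List Nat × List Int) i =>
      let s2 := pvPopLoop a d i s.1 s.2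
      (i :: s2.1, s2.2))
    (([] : List Nat), List.replicate n (1 : Int))
  pvMaxList (res.2.dropLast)

-- ===== PORT B =====
-- nearest index to the right with a strictly greater value (None if none)
def pvNge (a : List Int) (j : Nat) : Option Nat :=
  (List.range' (j + 1) (a.length - (j + 1))).find? (fun t => a.getD j 0 < a.getD t 0)

-- nearest index to the left with a strictly greater value (None if none)
def pvPge (a : List Int) (j : Nat) : Option Nat :=
  (List.range j).reverse.find? (fun t => a.getD j 0 < a.getD t 0)

-- one iteration of B's dp loop
def pvUpdB (a : List Int) (d : Int) (dp : List Int) (j : Nat) : List Int :=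
  match pvNge a j with
  | none => dp
  | some t =>
    let dp1 := if (t : Int) - (j : Int) ≤ d then dp.set t (max (dp.getD t 0) (dp.getD j 0 + 1)) else dp
    match pvPge a j with
    | none => dp1
    | some p => if (j : Int) - (p : Int) ≤ d then dp1.set p (max (dp1.getD p 0) (dp1.getD j 0 + 1)) else dp1

def solve_alt (arr : List Int) (d : Int) : Int :=
  let a := arr ++ [100001]
  let m := a.length
  let n := m - 1
  let order := PySem.List.sorted (List.range n) (fun j => a.getD j 0) false
  let dp := order.foldl (pvUpdB a d) (List.replicate m (1 : Int))
  pvMaxList (dp.take n)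

-- ===== PRECONDITION & SPEC =====
-- On arr = [] the Python A raises ValueError (max of empty slice); B raises there too.
def Pre_solve (arr : List Int) (d : Int) : Prop := arr ≠ []
instance (arr : List Int) (d : Int) : Decidable (Pre_solve arr d) := by unfold Pre_solve; infer_instance

def pvWitness_solve : List Int × Int := ([3, 1, 2], 2)

def Spec_solve (arr : List Int) (d : Int) (out : Int) : Prop := out = solve_alt arr d
instance (arr : List Int) (d : Int) (out : Int) : Decidable (Spec_solve arr d out) := by unfold Spec_solve; infer_instance

-- ===== CLAIM (what is proved, stated in full; the proofs are below) =====
def Claim_equal_solve : Prop := ∀ (arr : List Int) (d : Int), Dom_solve arr d → Pre_solve arr d → Spec_solve arr d (solve arr d)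

-- ===== LEMMAS AND PROOFS =====

-- value of index j in a (all indices used are in range)
def pvV (a : List Int) (j : Nat) : Int := a.getD j 0

-- j is a source of an update with target x (the "jump edges" both programs realise)
def edgeB (a : List Int) (d : Int) (x j : Nat) : Bool :=
  match pvNge a j with
  | none => false
  | some t =>
    ((x == t) && decide ((t : Int) - (j : Int) ≤ d)) ||
    (match pvPge a j with
     | none => false
     | some p => (x == p) && decide ((j : Int) - (p : Int) ≤ d))

-- rank of an index: number of positions holding a strictly smaller value
def pvRk (a : List Int) (x : Nat) : Nat :=
  ((Finset.range a.length).filter (fun k => pvV a k < pvV a x)).card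

-- fuelled closed-form dp
def pvFf (a : List Int) (d : Int) : Nat → Nat → Int
  | 0, _ => 1
  | s + 1, x =>
    ((List.range a.length).filter (fun j => edgeB a d x j)).foldl
      (fun acc j => max acc (pvFf a d s j + 1)) 1

def pvFv (a : List Int) (d : Int) (x : Nat) : Int := pvFf a d (pvRk a x + 1) x

-- dp after applying exactly the updates of the sources in P
def dpP (a : List Int) (d : Int) (P : Nat → Bool) (x : Nat) : Int :=
  ((List.range a.length).filter (fun j => edgeB a d x j && P j)).foldl
    (fun acc j => max acc (pvFv a d j + 1)) 1

-- sources applied before outer iteration i of A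
def pvPpre (a : List Int) (i : Nat) : Nat → Bool := fun j =>
  match pvNge a j with
  | none => false
  | some t => t < i

-- sources applied during iteration i of A while the stack is S
def pvPdur (a : List Int) (i : Nat) (S : List Nat) : Nat → Bool := fun j =>
  match pvNge a j with
  | none => false
  | some t => t < i || ((t == i) && !(S.contains j))

-- A's stack before iteration i, in closed form (head = top = largest index)
def pvStk (a : List Int) (i : Nat) : List Nat :=
  ((List.range i).filter
    (fun j => (List.range' (j + 1) (i - (j + 1))).all (fun k => decide (pvV a k ≤ pvV a j)))).reverse

-- ---- generic foldl-max toolkit ----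
theorem foldl_max_init (g : Nat → Int) (l : List Nat) (b : Int) :
    b ≤ l.foldl (fun acc j => max acc (g j)) b := by
  induction l generalizing b with
  | nil => simp
  | cons x t ih => exact le_trans (le_max_left _ _) (ih _)

theorem foldl_max_mem (g : Nat → Int) {l : List Nat} {j : Nat} (h : j ∈ l) (b : Int) :
    g j ≤ l.foldl (fun acc j => max acc (g j)) b := by
  induction l generalizing b with
  | nil => simp at h
  | cons x t ih =>
    rcases List.mem_cons.mp h with rfl | h'
    · exact le_trans (le_max_right _ _) (foldl_max_init _ _ _)
    · exact ih h' _

theorem foldl_max_le (g : Nat → Int) {l : List Nat} {B : Int} (b : Int)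
    (hb : b ≤ B) (h : ∀ j ∈ l, g j ≤ B) :
    l.foldl (fun acc j => max acc (g j)) b ≤ B := by
  induction l generalizing b with
  | nil => simpa
  | cons x t ih =>
    exact ih _ (max_le hb (h x (List.mem_cons_self))) (fun j hj => h j (List.mem_cons_of_mem _ hj))

theorem foldl_max_eq_of_mem_iff (g : Nat → Int) {l1 l2 : List Nat}
    (h : ∀ j, j ∈ l1 ↔ j ∈ l2) :
    l1.foldl (fun acc j => max acc (g j)) 1 = l2.foldl (fun acc j => max acc (g j)) 1 := by
  apply le_antisymm
  · exact foldl_max_le _ _ (foldl_max_init _ _ _) (fun j hj => foldl_max_mem _ ((h j).mp hj) _)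
  · exact foldl_max_le _ _ (foldl_max_init _ _ _) (fun j hj => foldl_max_mem _ ((h j).mpr hj) _)

-- ---- find? characterisations ----
theorem find?_range'_eq_some {p : Nat → Bool} {s len t : Nat} :
    (List.range' s len).find? p = some t ↔
      (s ≤ t ∧ t < s + len ∧ p t = true ∧ ∀ u, s ≤ u → u < t → p u = false) := by
  induction len generalizing s with
  | zero => simp; omega
  | succ k ih =>
    rw [List.range'_succ, List.find?_cons]
    by_cases hs : p s = true
    · simp [hs]
      constructor
      · rintro rfl; exact ⟨le_refl _, by omega, hs, fun u h1 h2 => absurd h1 (by omega)⟩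
      · rintro ⟨h1, h2, h3, h4⟩
        by_contra hne
        have := h4 s (le_refl _) (by omega)
        simp [hs] at this
    · simp [hs, ih]
      constructor
      · rintro ⟨h1, h2, h3, h4⟩
        refine ⟨by omega, by omega, h3, fun u hu1 hu2 => ?_⟩
        rcases Nat.eq_or_lt_of_le hu1 with rfl | h
        · simpa using hs
        · exact h4 u h hu2
      · rintro ⟨h1, h2, h3, h4⟩
        have hts : t ≠ s := by rintro rfl; simp [h3] at hs
        exact ⟨by omega, by omega, h3, fun u hu1 hu2 => h4 u (by omega) hu2⟩

theorem find?_rev_range_eq_some {p : Nat → Bool} {n t : Nat} :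
    (List.range n).reverse.find? p = some t ↔
      (t < n ∧ p t = true ∧ ∀ u, t < u → u < n → p u = false) := by
  induction n with
  | zero => simp
  | succ k ih =>
    rw [List.range_succ, List.reverse_append]
    simp only [List.reverse_singleton, List.singleton_append, List.find?_cons]
    by_cases hk : p k = true
    · simp [hk]
      constructor
      · rintro rfl; exact ⟨by omega, hk, fun u h1 h2 => by omega⟩
      · rintro ⟨h1, h2, h3⟩
        by_contra hne
        have := h3 k (by omega) (by omega)
        simp [hk] at this
    · simp [hk, ih]
      constructor
      · rintro ⟨h1, h2, h3⟩
        have : t ≠ k := by rintro rfl; simp [h2] at hk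
        refine ⟨by omega, h2, fun u hu1 hu2 => ?_⟩
        rcases Nat.lt_or_eq_of_le hu2 with h | rfl
        · exact h3 u hu1 h
        · simpa using hk
      · rintro ⟨h1, h2, h3⟩
        have htk : t ≠ k := by rintro rfl; simp [h2] at hk
        exact ⟨by omega, h2, fun u hu1 hu2 => h3 u hu1 (by omega)⟩

theorem find?_rev_range_eq_none {p : Nat → Bool} {n : Nat} :
    (List.range n).reverse.find? p = none ↔ ∀ u, u < n → p u = false := by
  rw [List.find?_eq_none]
  constructor
  · intro h u hu
    have := h u (by simp [hu])
    simpa using this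
  · intro h u hu
    simp at hu
    simp [h u hu]

-- ---- nge/pge characterisations ----
theorem nge_some_iff {a : List Int} {j t : Nat} :
    pvNge a j = some t ↔
      j < t ∧ t < a.length ∧ pvV a j < pvV a t ∧ ∀ k, j < k → k < t → pvV a k ≤ pvV a j := by
  unfold pvNge
  rw [find?_range'_eq_some]
  constructor
  · rintro ⟨h1, h2, h3, h4⟩
    refine ⟨by omega, by omega, by simpa [pvV] using h3, fun k hk1 hk2 => ?_⟩
    have := h4 k (by omega) hk2
    simp [pvV] at this ⊢
    omega
  · rintro ⟨h1, h2, h3, h4⟩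
    refine ⟨by omega, by omega, by simpa [pvV] using h3, fun u hu1 hu2 => ?_⟩
    have := h4 u (by omega) hu2
    simp [pvV] at this ⊢
    omega

theorem pge_some_iff {a : List Int} {j p : Nat} :
    pvPge a j = some p ↔
      p < j ∧ pvV a j < pvV a p ∧ ∀ u, p < u → u < j → pvV a u ≤ pvV a j := by
  unfold pvPge
  rw [find?_rev_range_eq_some]
  constructor
  · rintro ⟨h1, h2, h3⟩
    refine ⟨h1, by simpa [pvV] using h2, fun u hu1 hu2 => ?_⟩
    have := h3 u hu1 hu2
    simp [pvV] at this ⊢; omega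
  · rintro ⟨h1, h2, h3⟩
    refine ⟨h1, by simpa [pvV] using h2, fun u hu1 hu2 => ?_⟩
    have := h3 u hu1 hu2
    simp [pvV] at this ⊢; omega

theorem pge_none_iff {a : List Int} {j : Nat} :
    pvPge a j = none ↔ ∀ u, u < j → pvV a u ≤ pvV a j := by
  unfold pvPge
  rw [find?_rev_range_eq_none]
  constructor
  · intro h u hu
    have := h u hu
    simp [pvV] at this ⊢; omega
  · intro h u hu
    have := h u hu
    simp [pvV] at this ⊢; omega

theorem edgeB_val_lt {a : List Int} {d : Int} {x j : Nat} (h : edgeB a d x j = true) :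
    pvV a j < pvV a x := by
  unfold edgeB at h
  cases hng : pvNge a j with
  | none => simp [hng] at h
  | some t =>
    rw [hng] at h
    rcases nge_some_iff.mp hng with ⟨_, _, hv, _⟩
    cases hpg : pvPge a j with
    | none =>
      rw [hpg] at h
      simp at h
      rcases h with ⟨hx, _⟩
      subst hx; exact hv
    | some p =>
      rw [hpg] at h
      rcases pge_some_iff.mp hpg with ⟨_, hvp, _⟩
      simp at h
      rcases h with ⟨hx, _⟩ | ⟨hx, _⟩
      · subst hx; exact hv
      · subst hx; exact hvp

theorem edgeB_isSome {a : List Int} {d : Int} {x j : Nat} (h : edgeB a d x j = true) :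
    ∃ t, pvNge a j = some t := by
  unfold edgeB at h
  cases hng : pvNge a j with
  | none => simp [hng] at h
  | some t => exact ⟨t, rfl⟩

-- ---- rank and the closed-form dp ----
theorem rk_lt {a : List Int} {x j : Nat} (hjm : j < a.length) (hv : pvV a j < pvV a x) :
    pvRk a j < pvRk a x := by
  unfold pvRk
  apply Finset.card_lt_card
  constructor
  · intro k hk
    simp only [Finset.mem_filter, Finset.mem_range] at hk ⊢
    exact ⟨hk.1, lt_trans hk.2 hv⟩
  · intro hsub
    have hj : j ∈ (Finset.range a.length).filter (fun k => pvV a k < pvV a x) := by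
      simp only [Finset.mem_filter, Finset.mem_range]; exact ⟨hjm, hv⟩
    have := hsub hj
    simp only [Finset.mem_filter, Finset.mem_range] at this
    exact absurd this.2 (lt_irrefl _)

theorem foldl_max_congr (g1 g2 : Nat → Int) {l : List Nat} (b : Int)
    (h : ∀ j ∈ l, g1 j = g2 j) :
    l.foldl (fun acc j => max acc (g1 j)) b = l.foldl (fun acc j => max acc (g2 j)) b := by
  induction l generalizing b with
  | nil => rfl
  | cons x t ih =>
    simp only [List.foldl_cons]
    rw [h x (List.mem_cons_self)]
    exact ih _ (fun j hj => h j (List.mem_cons_of_mem _ hj))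

theorem Ff_stab (a : List Int) (d : Int) :
    ∀ s t x, pvRk a x < s → pvRk a x < t → pvFf a d s x = pvFf a d t x := by
  intro s
  induction s with
  | zero => intro t x h; omega
  | succ s ih =>
    intro t x hs ht
    cases t with
    | zero => omega
    | succ t =>
      show pvFf a d (s+1) x = pvFf a d (t+1) x
      unfold pvFf
      apply foldl_max_congr
      intro j hj
      simp only [List.mem_filter, List.mem_range] at hj
      have hv := edgeB_val_lt hj.2
      have hr := rk_lt hj.1 hv
      rw [ih t j (by omega) (by omega)]

theorem Fv_unfold (a : List Int) (d : Int) (x : Nat) :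
    pvFv a d x =
      ((List.range a.length).filter (fun j => edgeB a d x j)).foldl
        (fun acc j => max acc (pvFv a d j + 1)) 1 := by
  have h1 : pvFv a d x =
      ((List.range a.length).filter (fun j => edgeB a d x j)).foldl
        (fun acc j => max acc (pvFf a d (pvRk a x) j + 1)) 1 := rfl
  rw [h1]
  apply foldl_max_congr
  intro j hj
  simp only [List.mem_filter, List.mem_range] at hj
  have hr := rk_lt hj.1 (edgeB_val_lt hj.2)
  show pvFf a d (pvRk a x) j + 1 = pvFv a d j + 1
  unfold pvFv
  rw [Ff_stab a d (pvRk a x) (pvRk a j + 1) j (by omega) (by omega)]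

theorem mem_dpP_filter {a : List Int} {d : Int} {P : Nat → Bool} {x j : Nat} :
    j ∈ (List.range a.length).filter (fun j => edgeB a d x j && P j) ↔
      j < a.length ∧ edgeB a d x j = true ∧ P j = true := by
  simp [List.mem_filter]

theorem dpP_congr {a : List Int} {d : Int} {P1 P2 : Nat → Bool} {x : Nat}
    (h : ∀ s, s < a.length → edgeB a d x s = true → P1 s = P2 s) :
    dpP a d P1 x = dpP a d P2 x := by
  unfold dpP
  apply foldl_max_eq_of_mem_iff
  intro j
  rw [mem_dpP_filter, mem_dpP_filter]
  constructor
  · rintro ⟨h1, h2, h3⟩; exact ⟨h1, h2, by rw [← h j h1 h2]; exact h3⟩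
  · rintro ⟨h1, h2, h3⟩; exact ⟨h1, h2, by rw [h j h1 h2]; exact h3⟩

theorem dpP_bot (a : List Int) (d : Int) (x : Nat) : dpP a d (fun _ => false) x = 1 := by
  unfold dpP
  have : (List.range a.length).filter (fun j => edgeB a d x j && false) = [] := by
    simp
  rw [this]
  rfl

theorem dpP_eq_Fv {a : List Int} {d : Int} {P : Nat → Bool} {x : Nat}
    (h : ∀ s, s < a.length → edgeB a d x s = true → P s = true) :
    dpP a d P x = pvFv a d x := by
  rw [Fv_unfold]
  unfold dpP
  apply foldl_max_eq_of_mem_iff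
  intro j
  rw [mem_dpP_filter]
  simp only [List.mem_filter, List.mem_range]
  constructor
  · rintro ⟨h1, h2, _⟩; exact ⟨h1, h2⟩
  · rintro ⟨h1, h2⟩; exact ⟨h1, h2, h j h1 h2⟩

-- ---- dp list as a map over range ----
theorem map_range_getD (m : Nat) (g : Nat → Int) {x : Nat} (hx : x < m) :
    ((List.range m).map g).getD x 0 = g x := by
  rw [List.getD_eq_getElem?_getD]
  rw [List.getElem?_map]
  rw [List.getElem?_range hx]
  rfl

theorem map_range_set (m : Nat) (g : Nat → Int) {x : Nat} (c : Int) (hx : x < m) :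
    ((List.range m).map g).set x c = (List.range m).map (fun y => if y = x then c else g y) := by
  apply List.ext_getElem
  · simp
  · intro i h1 h2
    simp only [List.getElem_set, List.getElem_map, List.getElem_range]
    by_cases hix : i = x
    · simp [hix]
    · simp [hix, Ne.symm hix]

-- ---- applying one source's updates ----
-- common shape of pvUpdJ / pvUpdB once nge and pge are known
def pvApply (a : List Int) (d : Int) (t : Nat) (pOpt : Option Nat) (j : Nat) (dp : List Int) : List Int :=
  let dp1 := if (t : Int) - (j : Int) ≤ d then dp.set t (max (dp.getD t 0) (dp.getD j 0 + 1)) else dp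
  match pOpt with
  | none => dp1
  | some p => if (j : Int) - (p : Int) ≤ d then dp1.set p (max (dp1.getD p 0) (dp1.getD j 0 + 1)) else dp1

theorem updB_eq_apply {a : List Int} {d : Int} {j t : Nat} (dp : List Int)
    (hng : pvNge a j = some t) :
    pvUpdB a d dp j = pvApply a d t (pvPge a j) j dp := by
  unfold pvUpdB pvApply
  rw [hng]

theorem updB_eq_none {a : List Int} {d : Int} {j : Nat} (dp : List Int)
    (hng : pvNge a j = none) :
    pvUpdB a d dp j = dp := by
  unfold pvUpdB
  rw [hng]

theorem updJ_eq_apply (a : List Int) (d : Int) (i : Nat) (rest : List Nat) (dp : List Int) (j : Nat) :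
    pvUpdJ a d i rest dp j = pvApply a d i rest.head? j dp := by
  unfold pvUpdJ pvApply
  cases rest <;> rfl

theorem dpP_add_source {a : List Int} {d : Int} {P : Nat → Bool} {j : Nat}
    (hjm : j < a.length) (x : Nat) :
    dpP a d (fun s => P s || s == j) x =
      if edgeB a d x j then max (dpP a d P x) (pvFv a d j + 1) else dpP a d P x := by
  by_cases he : edgeB a d x j = true
  · rw [if_pos he]
    apply le_antisymm
    · apply foldl_max_le _ _ (le_max_of_le_left (foldl_max_init _ _ _))
      intro s hs
      rw [mem_dpP_filter] at hs
      rcases hs with ⟨h1, h2, h3⟩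
      rcases Bool.or_eq_true_iff.mp h3 with hp | hj
      · exact le_max_of_le_left (foldl_max_mem _ (mem_dpP_filter.mpr ⟨h1, h2, hp⟩) _)
      · have : s = j := by simpa using hj
        subst this
        exact le_max_right _ _
    · apply max_le
      · apply foldl_max_le _ _ (foldl_max_init _ _ _)
        intro s hs
        rw [mem_dpP_filter] at hs
        exact foldl_max_mem _ (mem_dpP_filter.mpr ⟨hs.1, hs.2.1, by simp [hs.2.2]⟩) _
      · exact foldl_max_mem _ (mem_dpP_filter.mpr ⟨hjm, he, by simp⟩) _
  · rw [if_neg he]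
    apply dpP_congr
    intro s hsm hse
    by_cases hsj : s = j
    · subst hsj; exact absurd hse he
    · simp [hsj]

theorem apply_spec {a : List Int} {d : Int} {P : Nat → Bool} {j t : Nat} {pOpt : Option Nat}
    (hng : pvNge a j = some t) (hpg : pvPge a j = pOpt)
    (hfin : ∀ s, s < a.length → edgeB a d j s = true → P s = true) :
    pvApply a d t pOpt j ((List.range a.length).map (dpP a d P)) =
      (List.range a.length).map (dpP a d (fun s => P s || s == j)) := by
  rcases nge_some_iff.mp hng with ⟨hjt, htm, _, _⟩
  have hjm : j < a.length := lt_trans hjt htm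
  have hjne : j ≠ t := by omega
  have hFvj : ((List.range a.length).map (dpP a d P)).getD j 0 = pvFv a d j := by
    rw [map_range_getD _ _ hjm, dpP_eq_Fv hfin]
  unfold pvApply
  cases pOpt with
  | none =>
    have hedge : ∀ x, edgeB a d x j = ((x == t) && decide ((t : Int) - (j : Int) ≤ d)) := by
      intro x
      unfold edgeB
      rw [hng, hpg]
      simp
    by_cases c1 : (t : Int) - (j : Int) ≤ d
    · rw [if_pos c1, map_range_getD _ _ htm, hFvj, map_range_set _ _ _ htm]
      apply List.map_congr_left
      intro x hx
      rw [List.mem_range] at hx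
      rw [dpP_add_source hjm x, hedge x]
      by_cases hxt : x = t
      · simp [hxt, c1]
      · simp [hxt]
    · rw [if_neg c1]
      apply List.map_congr_left
      intro x hx
      rw [dpP_add_source hjm x, hedge x]
      simp [c1]
  | some p =>
    rcases pge_some_iff.mp hpg with ⟨hpj, _, _⟩
    have hpm : p < a.length := lt_trans (lt_trans hpj hjt) htm
    have hpt : p ≠ t := by omega
    have hjp : j ≠ p := by omega
    have hedge : ∀ x, edgeB a d x j =
        (((x == t) && decide ((t : Int) - (j : Int) ≤ d)) ||
         ((x == p) && decide ((j : Int) - (p : Int) ≤ d))) := by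
      intro x
      unfold edgeB
      rw [hng, hpg]
    by_cases c1 : (t : Int) - (j : Int) ≤ d <;> by_cases c2 : (j : Int) - (p : Int) ≤ d
    · -- both updates fire
      rw [if_pos c1, map_range_getD _ _ htm, hFvj, map_range_set _ _ _ htm]
      show (if (j : Int) - (p : Int) ≤ d then _ else _) = _
      rw [if_pos c2, map_range_getD _ _ hpm, map_range_getD _ _ hjm, map_range_set _ _ _ hpm]
      apply List.map_congr_left
      intro x hx
      rw [List.mem_range] at hx
      rw [dpP_add_source hjm x, hedge x]
      by_cases hxp : x = p
      · subst hxp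
        simp [hpt, c1, c2, hjne, dpP_eq_Fv hfin]
      · by_cases hxt : x = t
        · subst hxt
          simp [hxp, c1]
        · simp [hxp, hxt]
    · rw [if_pos c1, map_range_getD _ _ htm, hFvj, map_range_set _ _ _ htm]
      show (if (j : Int) - (p : Int) ≤ d then _ else _) = _
      rw [if_neg c2]
      apply List.map_congr_left
      intro x hx
      rw [List.mem_range] at hx
      rw [dpP_add_source hjm x, hedge x]
      by_cases hxt : x = t
      · simp [hxt, c1]
      · simp [hxt, c2]
    · rw [if_neg c1]
      show (if (j : Int) - (p : Int) ≤ d then _ else _) = _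
      rw [if_pos c2, map_range_getD _ _ hpm, hFvj, map_range_set _ _ _ hpm]
      apply List.map_congr_left
      intro x hx
      rw [List.mem_range] at hx
      rw [dpP_add_source hjm x, hedge x]
      by_cases hxp : x = p
      · simp [hxp, c1, c2]
      · simp [hxp, c1]
    · rw [if_neg c1]
      show (if (j : Int) - (p : Int) ≤ d then _ else _) = _
      rw [if_neg c2]
      apply List.map_congr_left
      intro x hx
      rw [dpP_add_source hjm x, hedge x]
      simp [c1, c2]

-- ---- B: processing sources in ascending height order ----
theorem foldB (a : List Int) (d : Int) :
    ∀ (l : List Nat) (P : Nat → Bool),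
      l.Nodup →
      (∀ j ∈ l, P j = false) →
      (∀ j ∈ l, ∀ s, s < a.length → edgeB a d j s = true → (P s = true ∨ s ∈ l)) →
      l.Pairwise (fun x y => pvV a x ≤ pvV a y) →
      l.foldl (pvUpdB a d) ((List.range a.length).map (dpP a d P)) =
        (List.range a.length).map (dpP a d (fun s => P s || l.contains s)) := by
  intro l
  induction l with
  | nil =>
    intro P _ _ _ _
    simp only [List.foldl_nil]
    apply List.map_congr_left
    intro x _
    apply dpP_congr
    intro s _ _
    simp
  | cons j tl ih =>
    intro P hnd hP hcl hpw
    have hjtl : j ∉ tl := (List.nodup_cons.mp hnd).1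
    have hfin : ∀ s, s < a.length → edgeB a d j s = true → P s = true := by
      intro s hs hse
      rcases hcl j List.mem_cons_self s hs hse with h | h
      · exact h
      · exfalso
        have hv := edgeB_val_lt hse
        rcases List.mem_cons.mp h with rfl | hmem
        · exact absurd hv (lt_irrefl _)
        · have := (List.pairwise_cons.mp hpw).1 s hmem
          omega
    simp only [List.foldl_cons]
    cases hng : pvNge a j with
    | none =>
      rw [updB_eq_none _ hng]
      rw [ih P (List.nodup_cons.mp hnd).2
          (fun s hs => hP s (List.mem_cons_of_mem _ hs))
          (fun x hx s hs hse => by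
            rcases hcl x (List.mem_cons_of_mem _ hx) s hs hse with h | h
            · exact Or.inl h
            · rcases List.mem_cons.mp h with rfl | hmem
              · exfalso
                rcases edgeB_isSome hse with ⟨t, ht⟩
                rw [hng] at ht
                simp at ht
              · exact Or.inr hmem)
          (List.pairwise_cons.mp hpw).2]
      apply List.map_congr_left
      intro x _
      apply dpP_congr
      intro s hs hse
      by_cases hsj : s = j
      · subst hsj
        rcases edgeB_isSome hse with ⟨t, ht⟩
        rw [hng] at ht
        simp at ht
      · simp [hsj]
    | some t =>
      rw [updB_eq_apply _ hng, apply_spec hng rfl hfin]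
      rw [ih (fun s => P s || s == j) (List.nodup_cons.mp hnd).2
          (fun s hs => by
            have h1 := hP s (List.mem_cons_of_mem _ hs)
            have h2 : s ≠ j := by rintro rfl; exact hjtl hs
            simp [h1, h2])
          (fun x hx s hs hse => by
            rcases hcl x (List.mem_cons_of_mem _ hx) s hs hse with h | h
            · simp [h]
            · rcases List.mem_cons.mp h with rfl | hmem
              · simp
              · exact Or.inr hmem)
          (List.pairwise_cons.mp hpw).2]
      apply List.map_congr_left
      intro x _
      apply dpP_congr
      intro s _ _
      simp only [List.contains_cons, Bool.or_assoc]

-- B's final dp is the closed-form dp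
theorem solve_alt_eq (arr : List Int) (d : Int) :
    solve_alt arr d =
      pvMaxList (((List.range (arr ++ [100001]).length).map (pvFv (arr ++ [100001]) d)).take
        ((arr ++ [100001]).length - 1)) := by
  unfold solve_alt
  dsimp only
  have hsrc : ∀ x s, s < (arr ++ [100001]).length → edgeB (arr ++ [100001]) d x s = true →
      s < (arr ++ [100001]).length - 1 := by
    intro x s hs hse
    rcases edgeB_isSome hse with ⟨t, ht⟩
    rcases nge_some_iff.mp ht with ⟨h1, h2, _, _⟩
    omega
  have hperm := PySem.List.sorted_perm (List.range ((arr ++ [100001]).length - 1))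
      (fun j => (arr ++ [100001]).getD j 0) false
  have hmem : ∀ s, s ∈ PySem.List.sorted (List.range ((arr ++ [100001]).length - 1))
      (fun j => (arr ++ [100001]).getD j 0) false ↔ s < (arr ++ [100001]).length - 1 := by
    intro s
    rw [hperm.mem_iff, List.mem_range]
  have hrep : List.replicate (arr ++ [100001]).length (1 : Int) =
      (List.range (arr ++ [100001]).length).map (dpP (arr ++ [100001]) d (fun _ => false)) := by
    apply List.ext_getElem
    · simp
    · intro i h1 h2
      simp only [List.getElem_replicate, List.getElem_map, List.getElem_range]
      rw [dpP_bot]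
  rw [hrep]
  rw [foldB (arr ++ [100001]) d _ _ (hperm.nodup_iff.mpr (List.nodup_range))
      (fun j _ => rfl)
      (fun j _ s hs hse => Or.inr ((hmem s).mpr (hsrc j s hs hse)))
      (by
        have := PySem.List.sorted_pairwise (List.range ((arr ++ [100001]).length - 1))
          (fun j => (arr ++ [100001]).getD j 0)
        exact this)]
  congr 1
  congr 1
  apply List.map_congr_left
  intro x _
  apply dpP_eq_Fv
  intro s hs hse
  have hmem2 := (hmem s).mpr (hsrc x s hs hse)
  simpa using hmem2

-- ---- A: the monotonic stack in closed form ----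
theorem mem_stk {a : List Int} {i j : Nat} :
    j ∈ pvStk a i ↔ j < i ∧ ∀ k, j < k → k < i → pvV a k ≤ pvV a j := by
  unfold pvStk
  rw [List.mem_reverse, List.mem_filter]
  simp only [List.mem_range, List.all_eq_true, decide_eq_true_eq]
  constructor
  · rintro ⟨h1, h2⟩
    refine ⟨h1, fun k hk1 hk2 => ?_⟩
    exact h2 k (by rw [List.mem_range'_1]; omega)
  · rintro ⟨h1, h2⟩
    refine ⟨h1, fun k hk => ?_⟩
    rw [List.mem_range'_1] at hk
    exact h2 k (by omega) (by omega)

theorem stk_pairwise_gt (a : List Int) (i : Nat) : (pvStk a i).Pairwise (· > ·) := by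
  unfold pvStk
  rw [List.pairwise_reverse]
  exact (List.pairwise_lt_range).filter _

theorem stk_nodup (a : List Int) (i : Nat) : (pvStk a i).Nodup := by
  exact (stk_pairwise_gt a i).imp (fun h => Nat.ne_of_gt h)

theorem stk_pairwise_le (a : List Int) (i : Nat) :
    (pvStk a i).Pairwise (fun x y => pvV a x ≤ pvV a y) := by
  have h := stk_pairwise_gt a i
  apply List.Pairwise.imp_of_mem _ h
  intro x y hx hy hgt
  rcases mem_stk.mp hy with ⟨hy1, hy2⟩
  exact hy2 x hgt (mem_stk.mp hx).1

theorem filter_eq_dropWhile_not (p : Nat → Bool) :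
    ∀ (l : List Nat), l.Pairwise (fun x y => p x = true → p y = true) →
      l.filter p = l.dropWhile (fun x => !p x) := by
  intro l
  induction l with
  | nil => intro _; rfl
  | cons x t ih =>
    intro hpw
    rcases List.pairwise_cons.mp hpw with ⟨hx, ht⟩
    by_cases hpx : p x = true
    · rw [List.filter_cons_of_pos hpx, List.dropWhile_cons_of_neg (by simp [hpx])]
      congr 1
      exact List.filter_eq_self.mpr (fun y hy => hx y hy hpx)
    · rw [List.filter_cons_of_neg hpx, List.dropWhile_cons_of_pos (by simp [hpx])]
      exact ih ht

theorem stk_zero (a : List Int) : pvStk a 0 = [] := by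
  unfold pvStk
  simp

theorem stk_succ (a : List Int) (i : Nat) :
    pvStk a (i + 1) = i :: (pvStk a i).dropWhile (fun j => decide (pvV a j < pvV a i)) := by
  unfold pvStk
  rw [List.range_succ, List.filter_append, List.reverse_append]
  have h2 : List.filter
      (fun j => (List.range' (j + 1) (i + 1 - (j + 1))).all fun k => decide (pvV a k ≤ pvV a j)) [i]
      = [i] := by
    simp
  rw [h2]
  simp only [List.reverse_singleton, List.singleton_append]
  congr 1
  have hcongr : (List.range i).filter
      (fun j => (List.range' (j + 1) (i + 1 - (j + 1))).all (fun k => decide (pvV a k ≤ pvV a j))) =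
      (List.range i).filter
      (fun j => ((List.range' (j + 1) (i - (j + 1))).all (fun k => decide (pvV a k ≤ pvV a j)))
        && decide (pvV a i ≤ pvV a j)) := by
    apply List.filter_congr
    intro j hj
    rw [List.mem_range] at hj
    have hsplit : List.range' (j + 1) (i + 1 - (j + 1)) = List.range' (j + 1) (i - (j + 1)) ++ [i] := by
      have h1 : i + 1 - (j + 1) = (i - (j + 1)) + 1 := by omega
      rw [h1, List.range'_1_concat]
      congr 2
      omega
    rw [hsplit, List.all_append]
    simp
  rw [hcongr]
  have hff : ∀ l : List Nat, l.filter
      (fun j => ((List.range' (j + 1) (i - (j + 1))).all (fun k => decide (pvV a k ≤ pvV a j)))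
        && decide (pvV a i ≤ pvV a j)) =
      (l.filter (fun j => (List.range' (j + 1) (i - (j + 1))).all (fun k => decide (pvV a k ≤ pvV a j)))).filter
        (fun j => decide (pvV a i ≤ pvV a j)) := by
    intro l
    rw [List.filter_filter]
    apply List.filter_congr
    intro j _
    rw [Bool.and_comm]
  rw [hff, ← List.filter_reverse]
  have : ((List.range i).filter
      (fun j => (List.range' (j + 1) (i - (j + 1))).all (fun k => decide (pvV a k ≤ pvV a j)))).reverse
      = pvStk a i := rfl
  rw [this]
  rw [filter_eq_dropWhile_not _ _ ((stk_pairwise_le a i).imp_of_mem (by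
    intro x y hx hy hxy
    simp only [decide_eq_true_eq] at *
    intro h
    omega))]
  have hfun : (fun x => !decide (pvV a i ≤ pvV a x)) = (fun j => decide (pvV a j < pvV a i)) := by
    funext x
    rcases lt_or_ge (pvV a x) (pvV a i) with h | h
    · simp [h, not_le.mpr h]
    · simp [not_lt.mpr h, h]
  rw [hfun]

theorem nge_of_stk {a : List Int} {i j : Nat} (him : i < a.length)
    (hj : j ∈ pvStk a i) (hv : pvV a j < pvV a i) : pvNge a j = some i := by
  rcases mem_stk.mp hj with ⟨h1, h2⟩
  exact nge_some_iff.mpr ⟨h1, him, hv, h2⟩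

theorem mem_stk_of_nge {a : List Int} {i j : Nat} (h : pvNge a j = some i) : j ∈ pvStk a i := by
  rcases nge_some_iff.mp h with ⟨h1, _, _, h4⟩
  exact mem_stk.mpr ⟨h1, h4⟩

-- processing one popped isoheight group
theorem fold_group (a : List Int) (d : Int) (i : Nat) (rest : List Nat) (v0 : Int)
    (hrest : ∀ r ∈ rest, v0 < pvV a r) :
    ∀ (G : List Nat),
      G.Nodup →
      (∀ j ∈ G, pvNge a j = some i) →
      (∀ j ∈ G, pvPge a j = rest.head?) →
      (∀ j ∈ G, pvV a j = v0) →
      G.foldl (pvUpdJ a d i rest) ((List.range a.length).map (dpP a d (pvPdur a i (G ++ rest)))) =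
        (List.range a.length).map (dpP a d (pvPdur a i rest)) := by
  intro G
  induction G with
  | nil => intro _ _ _ _; simp only [List.nil_append, List.foldl_nil]
  | cons j G' ih =>
    intro hnd hnge hpge hval
    have hngej := hnge j List.mem_cons_self
    have hvj := hval j List.mem_cons_self
    rcases nge_some_iff.mp hngej with ⟨hji, him, hvji, hbet⟩
    have hjG' : j ∉ G' := (List.nodup_cons.mp hnd).1
    have hjrest : j ∉ rest := fun hr => by have := hrest j hr; omega
    simp only [List.cons_append, List.foldl_cons]
    rw [updJ_eq_apply, ← hpge j List.mem_cons_self]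
    have hfin : ∀ s, s < a.length → edgeB a d j s = true →
        pvPdur a i (j :: (G' ++ rest)) s = true := by
      intro s hs hse
      have hvs := edgeB_val_lt hse
      unfold edgeB at hse
      cases hns : pvNge a s with
      | none => rw [hns] at hse; simp at hse
      | some ts =>
        rw [hns] at hse
        rcases nge_some_iff.mp hns with ⟨hsts, htsm, hvsts, hbet2⟩
        have hts : ts < i ∨ ts = i := by
          rcases Bool.or_eq_true_iff.mp hse with h1 | h1
          · have : j = ts := by simpa using (Bool.and_eq_true_iff.mp h1).1
            omega
          · cases hps : pvPge a s with
            | none => rw [hps] at h1; simp at h1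
            | some p =>
              rw [hps] at h1
              have hjp : j = p := by simpa using (Bool.and_eq_true_iff.mp h1).1
              subst hjp
              rcases pge_some_iff.mp hps with ⟨hpj, hvp, hmax⟩
              have hsi : s < i := by
                by_contra hge
                push Not at hge
                rcases Nat.eq_or_lt_of_le hge with h | hlt
                · subst h; omega
                · have := hmax i hji hlt
                  omega
              by_contra hgt
              push Not at hgt
              have h5 := hbet2 i hsi (by omega)
              omega
        rcases hts with h | h
        · unfold pvPdur; rw [hns]; simp [h]
        · subst h
          have hsmem : s ∉ j :: (G' ++ rest) := by
            intro hmem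
            rcases List.mem_cons.mp hmem with h2 | hmem2
            · subst h2; omega
            · rcases List.mem_append.mp hmem2 with h2 | h2
              · have := hval s (List.mem_cons_of_mem _ h2); omega
              · have := hrest s h2; omega
          unfold pvPdur
          rw [hns]
          simpa using hsmem
    rw [apply_spec hngej rfl hfin]
    have hpoint : ∀ x, dpP a d (fun s => pvPdur a i (j :: (G' ++ rest)) s || s == j) x =
        dpP a d (pvPdur a i (G' ++ rest)) x := by
      intro x
      apply dpP_congr
      intro s _ _
      by_cases hsj : s = j
      · subst hsj
        unfold pvPdur
        rw [hngej]
        simp [hjG', hjrest]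
      · unfold pvPdur
        cases hns2 : pvNge a s with
        | none => simp [hsj]
        | some t2 => simp [hsj]
    rw [List.map_congr_left (fun x _ => hpoint x)]
    exact ih (List.nodup_cons.mp hnd).2
      (fun x hx => hnge x (List.mem_cons_of_mem _ hx))
      (fun x hx => hpge x (List.mem_cons_of_mem _ hx))
      (fun x hx => hval x (List.mem_cons_of_mem _ hx))

theorem dropWhile_head_false {p : Nat → Bool} :
    ∀ {l : List Nat} {h : Nat} {tr : List Nat}, l.dropWhile p = h :: tr → p h = false := by
  intro l
  induction l with
  | nil => intro h tr he; simp at he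
  | cons x t ih =>
    intro h tr he
    rw [List.dropWhile_cons] at he
    by_cases hx : p x = true
    · rw [if_pos hx] at he
      exact ih he
    · rw [if_neg hx] at he
      have : x = h := (List.cons.injEq _ _ _ _ ▸ he).1
      subst this
      simpa using hx

-- the S = [] leg of the pop loop
theorem popLoop_nil_case (a : List Int) (d : Int) (i : Nat)
    (hdropall : ∀ j ∈ pvStk a i, pvV a j < pvV a i) :
    pvPopLoop a d i [] ((List.range a.length).map (dpP a d (pvPdur a i []))) =
      ((pvStk a i).dropWhile (fun j => decide (pvV a j < pvV a i)),
       (List.range a.length).map (dpP a d (pvPpre a (i + 1)))) := by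
  rw [pvPopLoop]
  refine Prod.ext ?_ ?_
  · show ([] : List Nat) = (pvStk a i).dropWhile (fun j => decide (pvV a j < pvV a i))
    symm
    rw [List.dropWhile_eq_nil_iff]
    intro j hj
    simpa using hdropall j hj
  · show (List.range a.length).map (dpP a d (pvPdur a i [])) = _
    apply List.map_congr_left
    intro x _
    apply dpP_congr
    intro s _ _
    unfold pvPdur pvPpre
    cases hns : pvNge a s with
    | none => rfl
    | some t =>
      rcases Nat.lt_trichotomy t i with h | h | h
      · simp [h, Nat.lt_succ_of_lt h]
      · subst h; simp
      · have h2 : t ≠ i := by omega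
        simp [show ¬ t < i by omega, h2, show ¬ t < i + 1 by omega]

theorem popLoop_spec (a : List Int) (d : Int) (i : Nat) (him : i < a.length) :
    ∀ (n : Nat) (S : List Nat), S.length ≤ n →
      S <:+ pvStk a i →
      (∀ j ∈ pvStk a i, j ∉ S → pvV a j < pvV a i) →
      pvPopLoop a d i S ((List.range a.length).map (dpP a d (pvPdur a i S))) =
        ((pvStk a i).dropWhile (fun j => decide (pvV a j < pvV a i)),
         (List.range a.length).map (dpP a d (pvPpre a (i + 1)))) := by
  intro n
  induction n with
  | zero =>
    intro S hlen _ hdrop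
    have hS : S = [] := List.length_eq_zero_iff.mp (by omega)
    subst hS
    exact popLoop_nil_case a d i (fun j hj => hdrop j hj (by simp))
  | succ n ih =>
    intro S hlen hsuf hdrop
    cases S with
    | nil => exact popLoop_nil_case a d i (fun j hj => hdrop j hj (by simp))
    | cons j0 st =>
      obtain ⟨pre, hpre⟩ := hsuf
      have hstk_nd := stk_nodup a i
      have hS_stk : ∀ x ∈ j0 :: st, x ∈ pvStk a i := by
        intro x hx
        rw [← hpre]
        exact List.mem_append_right _ hx
      have hS_pw_gt : (j0 :: st).Pairwise (· > ·) :=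
        (stk_pairwise_gt a i).sublist (hpre ▸ (List.sublist_append_right pre _))
      have hS_pw_le : (j0 :: st).Pairwise (fun x y => pvV a x ≤ pvV a y) :=
        (stk_pairwise_le a i).sublist (hpre ▸ (List.sublist_append_right pre _))
      have hvals_st : ∀ x ∈ st, pvV a j0 ≤ pvV a x := (List.pairwise_cons.mp hS_pw_le).1
      have hj0i : j0 ∈ pvStk a i := hS_stk j0 List.mem_cons_self
      have hj0lt : j0 < i := (mem_stk.mp hj0i).1
      by_cases hcond : a.getD j0 0 < a.getD i 0
      · -- pop branch
        rw [pvPopLoop]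
        rw [if_pos hcond]
        have hvj0i : pvV a j0 < pvV a i := hcond
        have hiso_val : ∀ j ∈ j0 :: st.takeWhile (fun j => a.getD j 0 == a.getD j0 0),
            pvV a j = pvV a j0 := by
          intro j hj
          rcases List.mem_cons.mp hj with rfl | hj2
          · rfl
          · have hbq := List.mem_takeWhile_imp hj2
            exact eq_of_beq hbq
        have hiso_sub : ∀ j ∈ j0 :: st.takeWhile (fun j => a.getD j 0 == a.getD j0 0),
            j ∈ j0 :: st := by
          intro j hj
          rcases List.mem_cons.mp hj with rfl | hj2
          · exact List.mem_cons_self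
          · exact List.mem_cons_of_mem _ ((List.takeWhile_sublist _).mem hj2)
        have hrest_val : ∀ r ∈ st.dropWhile (fun j => a.getD j 0 == a.getD j0 0),
            pvV a j0 < pvV a r := by
          cases hr : st.dropWhile (fun j => a.getD j 0 == a.getD j0 0) with
          | nil => intro r hrr; simp at hrr
          | cons h tr =>
            intro r hrr
            have hh_st : h ∈ st := (List.dropWhile_sublist _).mem (hr ▸ List.mem_cons_self)
            have hhne : pvV a h ≠ pvV a j0 := by
              have := dropWhile_head_false hr
              intro he
              rw [show (a.getD h 0 == a.getD j0 0) = true from beq_iff_eq.mpr he] at this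
              simp at this
            have hhgt : pvV a j0 < pvV a h :=
              lt_of_le_of_ne (hvals_st h hh_st) (Ne.symm hhne)
            rcases List.mem_cons.mp hrr with rfl | hrr2
            · exact hhgt
            · have hpw : (h :: tr).Pairwise (fun x y => pvV a x ≤ pvV a y) :=
                (List.pairwise_cons.mp hS_pw_le).2.sublist (hr ▸ List.dropWhile_sublist _)
              exact lt_of_lt_of_le hhgt ((List.pairwise_cons.mp hpw).1 r hrr2)
        have hiso_nodup : (j0 :: st.takeWhile (fun j => a.getD j 0 == a.getD j0 0)).Nodup := by
          have hSnd : (j0 :: st).Nodup := hS_pw_gt.imp (fun h => Nat.ne_of_gt h)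
          exact hSnd.sublist ((List.takeWhile_sublist _).cons_cons j0)
        have hiso_nge : ∀ j ∈ j0 :: st.takeWhile (fun j => a.getD j 0 == a.getD j0 0),
            pvNge a j = some i := by
          intro j hj
          exact nge_of_stk him (hS_stk j (hiso_sub j hj)) (by rw [hiso_val j hj]; exact hvj0i)
        have hiso_pge : ∀ j ∈ j0 :: st.takeWhile (fun j => a.getD j 0 == a.getD j0 0),
            pvPge a j = (st.dropWhile (fun j => a.getD j 0 == a.getD j0 0)).head? := by
          intro j hj
          have hvj : pvV a j = pvV a j0 := hiso_val j hj
          have hjS : j ∈ j0 :: st := hiso_sub j hj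
          have hjstk : j ∈ pvStk a i := hS_stk j hjS
          have hji : j < i := (mem_stk.mp hjstk).1
          have hrest_lt_j : ∀ r ∈ st.dropWhile (fun j => a.getD j 0 == a.getD j0 0), r < j := by
            intro r hrr
            have hr_st : r ∈ st := (List.dropWhile_sublist _).mem hrr
            rcases List.mem_cons.mp hj with rfl | hj2
            · exact (List.pairwise_cons.mp hS_pw_gt).1 r hr_st
            · have hst_pw : st.Pairwise (· > ·) := (List.pairwise_cons.mp hS_pw_gt).2
              rw [← List.takeWhile_append_dropWhile
                (p := fun j => a.getD j 0 == a.getD j0 0) (l := st)] at hst_pw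
              exact (List.pairwise_append.mp hst_pw).2.2 j hj2 r hrr
          -- any pge-witness of j lies in rest
          have hq_rest : ∀ c, pvPge a j = some c →
              c ∈ st.dropWhile (fun j => a.getD j 0 == a.getD j0 0) := by
            intro c hc
            rcases pge_some_iff.mp hc with ⟨hcj, hvc, hcmax⟩
            have hc_stk : c ∈ pvStk a i := by
              apply mem_stk.mpr
              refine ⟨by omega, fun k hk1 hk2 => ?_⟩
              rcases Nat.lt_trichotomy k j with hkj | rfl | hkj
              · have := hcmax k hk1 hkj
                omega
              · omega
              · have := (mem_stk.mp hjstk).2 k hkj hk2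
                omega
            have hc_S : c ∈ j0 :: st := by
              rw [← hpre] at hc_stk
              rcases List.mem_append.mp hc_stk with hcp | hcs
              · exfalso
                have hgt := (List.pairwise_append.mp (hpre ▸ stk_pairwise_gt a i)).2.2
                  c hcp j0 List.mem_cons_self
                have hjj0 : j ≤ j0 := by
                  rcases List.mem_cons.mp hjS with rfl | hj2
                  · exact le_refl _
                  · exact le_of_lt ((List.pairwise_cons.mp hS_pw_gt).1 j hj2)
                omega
              · exact hcs
            have hc_ne_j0 : c ≠ j0 := by
              intro he
              subst he
              have := hvj
              omega
            have hc_st : c ∈ st := by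
              rcases List.mem_cons.mp hc_S with he | h2
              · exact absurd he hc_ne_j0
              · exact h2
            rw [← List.takeWhile_append_dropWhile
              (p := fun j => a.getD j 0 == a.getD j0 0) (l := st)] at hc_st
            rcases List.mem_append.mp hc_st with h2 | h2
            · exfalso
              have hbq := List.mem_takeWhile_imp h2
              have : pvV a c = pvV a j0 := eq_of_beq hbq
              omega
            · exact h2
          cases hr : st.dropWhile (fun j => a.getD j 0 == a.getD j0 0) with
          | nil =>
            cases hqq : pvPge a j with
            | none => rfl
            | some c =>
              exfalso
              have := hq_rest c hqq
              rw [hr] at this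
              simp at this
          | cons h tr =>
            have hh_rest : h ∈ st.dropWhile (fun j => a.getD j 0 == a.getD j0 0) := by
              rw [hr]; exact List.mem_cons_self
            have hhj : h < j := hrest_lt_j h hh_rest
            have hvh : pvV a j < pvV a h := by
              have := hrest_val h hh_rest
              omega
            cases hqq : pvPge a j with
            | none =>
              exfalso
              have := pge_none_iff.mp hqq h hhj
              omega
            | some c =>
              have hc_rest := hq_rest c hqq
              rcases pge_some_iff.mp hqq with ⟨hcj, hvc, hcmax⟩
              have hhc : h ≤ c := by
                by_contra hlt
                push Not at hlt
                have := hcmax h hlt hhj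
                omega
              have hch : c = h := by
                rw [hr] at hc_rest
                rcases List.mem_cons.mp hc_rest with he | h2
                · exact he
                · exfalso
                  have hpwr : (h :: tr).Pairwise (· > ·) :=
                    (List.pairwise_cons.mp hS_pw_gt).2.sublist (hr ▸ List.dropWhile_sublist _)
                  have := (List.pairwise_cons.mp hpwr).1 c h2
                  omega
              rw [hch]
              rfl
        -- run the group fold, then recurse
        show pvPopLoop a d i (st.dropWhile (fun j => a.getD j 0 == a.getD j0 0))
            ((j0 :: st.takeWhile (fun j => a.getD j 0 == a.getD j0 0)).foldl
              (pvUpdJ a d i (st.dropWhile (fun j => a.getD j 0 == a.getD j0 0)))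
              ((List.range a.length).map (dpP a d (pvPdur a i (j0 :: st))))) = _
        have hisorest : (j0 :: st.takeWhile (fun j => a.getD j 0 == a.getD j0 0)) ++
            st.dropWhile (fun j => a.getD j 0 == a.getD j0 0) = j0 :: st := by
          rw [List.cons_append, List.takeWhile_append_dropWhile]
        rw [show pvPdur a i (j0 :: st) = pvPdur a i
            ((j0 :: st.takeWhile (fun j => a.getD j 0 == a.getD j0 0)) ++
             st.dropWhile (fun j => a.getD j 0 == a.getD j0 0)) from by rw [hisorest]]
        rw [fold_group a d i _ (pvV a j0) hrest_val _ hiso_nodup hiso_nge hiso_pge hiso_val]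
        apply ih
        · have h1 := List.length_dropWhile_le (fun j => a.getD j 0 == a.getD j0 0) st
          simp only [List.length_cons] at hlen
          omega
        · exact (List.dropWhile_suffix _).trans ((List.suffix_cons j0 st).trans ⟨pre, hpre⟩)
        · intro x hx hxr
          by_cases hxS : x ∈ j0 :: st
          · rcases List.mem_cons.mp hxS with rfl | hx2
            · exact hvj0i
            · rw [← List.takeWhile_append_dropWhile
                (p := fun j => a.getD j 0 == a.getD j0 0) (l := st)] at hx2
              rcases List.mem_append.mp hx2 with h2 | h2
              · have hbq := List.mem_takeWhile_imp h2
                have : pvV a x = pvV a j0 := eq_of_beq hbq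
                omega
              · exact absurd h2 hxr
          · exact hdrop x hx hxS
      · -- no pop: the loop stops
        rw [pvPopLoop]
        rw [if_neg hcond]
        have hvi_le : pvV a i ≤ pvV a j0 := not_lt.mp hcond
        refine Prod.ext ?_ ?_
        · show j0 :: st = (pvStk a i).dropWhile (fun j => decide (pvV a j < pvV a i))
          symm
          rw [← hpre, List.dropWhile_append]
          have hpre_drop : (pre.dropWhile (fun j => decide (pvV a j < pvV a i))) = [] := by
            rw [List.dropWhile_eq_nil_iff]
            intro x hx
            have hxs : x ∈ pvStk a i := by rw [← hpre]; exact List.mem_append_left _ hx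
            have hdisj := (List.nodup_append.mp (hpre ▸ hstk_nd)).2.2
            have hxnS : x ∉ j0 :: st := by
              intro hmem
              exact hdisj x hx x hmem rfl
            simpa using hdrop x hxs hxnS
          rw [hpre_drop]
          simp only [List.isEmpty_nil, if_pos]
          rw [List.dropWhile_cons_of_neg (by simpa using hvi_le)]
        · show (List.range a.length).map (dpP a d (pvPdur a i (j0 :: st))) = _
          apply List.map_congr_left
          intro x _
          apply dpP_congr
          intro s _ _
          unfold pvPdur pvPpre
          cases hns : pvNge a s with
          | none => rfl
          | some t =>
            rcases Nat.lt_trichotomy t i with h | h | h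
            · simp [h, Nat.lt_succ_of_lt h]
            · subst h
              have hsnS : s ∉ j0 :: st := by
                intro hsS
                rcases nge_some_iff.mp hns with ⟨_, _, hvs, _⟩
                rcases List.mem_cons.mp hsS with rfl | hs2
                · omega
                · have := hvals_st s hs2
                  omega
              simp [hsnS]
            · have h2 : t ≠ i := by omega
              simp [show ¬ t < i by omega, h2, show ¬ t < i + 1 by omega]

-- ---- A: the outer loop ----
theorem loopA (a : List Int) (d : Int) :
    ∀ k, k ≤ a.length →
      (List.range k).foldl
        (fun (s : List Nat × List Int) i =>
          (i :: (pvPopLoop a d i s.1 s.2).1, (pvPopLoop a d i s.1 s.2).2))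
        (([] : List Nat), (List.range a.length).map (dpP a d (pvPpre a 0))) =
      (pvStk a k, (List.range a.length).map (dpP a d (pvPpre a k))) := by
  intro k
  induction k with
  | zero =>
    intro _
    rw [stk_zero]
    rfl
  | succ k ihk =>
    intro hk
    rw [List.range_succ, List.foldl_append, ihk (by omega)]
    simp only [List.foldl_cons, List.foldl_nil]
    have hentry : (List.range a.length).map (dpP a d (pvPpre a k)) =
        (List.range a.length).map (dpP a d (pvPdur a k (pvStk a k))) := by
      apply List.map_congr_left
      intro x _
      apply dpP_congr
      intro s _ _
      unfold pvPpre pvPdur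
      cases hns : pvNge a s with
      | none => rfl
      | some t =>
        by_cases ht : t = k
        · subst ht
          have hmem : s ∈ pvStk a t := mem_stk_of_nge hns
          simp [hmem]
        · simp [ht]
    rw [hentry,
      popLoop_spec a d k (by omega) (pvStk a k).length (pvStk a k) le_rfl List.suffix_rfl
        (fun j hj hnj => absurd hj hnj)]
    rw [← stk_succ]

-- A's final dp is the closed-form dp
theorem solve_eq (arr : List Int) (d : Int) :
    solve arr d =
      pvMaxList (((List.range (arr ++ [100001]).length).map (pvFv (arr ++ [100001]) d)).dropLast) := by
  unfold solve
  dsimp only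
  have hrep : List.replicate (arr ++ [100001]).length (1 : Int) =
      (List.range (arr ++ [100001]).length).map
        (dpP (arr ++ [100001]) d (pvPpre (arr ++ [100001]) 0)) := by
    apply List.ext_getElem
    · simp
    · intro i h1 h2
      simp only [List.getElem_replicate, List.getElem_map, List.getElem_range]
      have : dpP (arr ++ [100001]) d (pvPpre (arr ++ [100001]) 0) i =
          dpP (arr ++ [100001]) d (fun _ => false) i := by
        apply dpP_congr
        intro s _ _
        unfold pvPpre
        cases hns : pvNge (arr ++ [100001]) s with
        | none => rfl
        | some t => simp
      rw [this, dpP_bot]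
  rw [hrep]
  have hmain := loopA (arr ++ [100001]) d (arr ++ [100001]).length le_rfl
  rw [hmain]
  congr 2
  apply List.map_congr_left
  intro x _
  apply dpP_eq_Fv
  intro s _ hse
  rcases edgeB_isSome hse with ⟨t, ht⟩
  rcases nge_some_iff.mp ht with ⟨_, htm, _, _⟩
  unfold pvPpre
  rw [ht]
  simpa using htm

-- ===== VERDICT (by name: the statement is the Claim_ definition above) =====
theorem solve_spec : Claim_equal_solve := by
  unfold Claim_equal_solve
  intro arr d _ _
  unfold Spec_solve
  rw [solve_eq, solve_alt_eq]
  congr 1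
  rw [List.dropLast_eq_take]
  congr 1
  simp
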